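-- pv_equiv track=rewrite | github.com/jonathangjertsen/jchord | jchord/core.py | split_to_base_and_shift
-- ===== SOURCE A (Python) =====
-- class InvalidDegree(Exception):
--     """Raised if the string one attempts to interpret is not a valid scale degree"""
--
-- def split_to_base_and_shift(
--     name_or_degree: str, name_before_accidental: bool
-- ) -> (str, int):
--     """Takes a string representation of a note name or a degree. Returns a
--     tuple where the first element is the string representation of the degree
--     with accidentals removed, and the second element is the number of semitones
--     needed to account fo accidentals.
--
--     Examples:
--
--     * `split_to_base_and_shift("A#", name_before_accidental=True) == ("A", 1)`
--     * `split_to_base_and_shift("Ab", name_before_accidental=True) == ("A", -1)`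
--     * `split_to_base_and_shift("A", name_before_accidental=True) == ("A", 0)`
--     * `split_to_base_and_shift("Abbbb", name_before_accidental=True) == ("A", -4)`
--     * `split_to_base_and_shift("b9", name_before_accidental=False) == ("9", -1)`
--     * `split_to_base_and_shift("#9", name_before_accidental=False) == ("9", 1)`
--     """
--     if "b" in name_or_degree and "#" in name_or_degree:
--         raise InvalidDegree("Both sharp and flat in degree")
--
--     shift = 0
--     if name_before_accidental:
--         while name_or_degree.endswith("b"):
--             shift -= 1
--             name_or_degree = name_or_degree[:-1]
--         while name_or_degree.endswith("#"):
--             shift += 1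
--             name_or_degree = name_or_degree[:-1]
--     else:
--         while name_or_degree.startswith("b"):
--             shift -= 1
--             name_or_degree = name_or_degree[1:]
--         while name_or_degree.startswith("#"):
--             shift += 1
--             name_or_degree = name_or_degree[1:]
--     return name_or_degree, shift
-- ===== SOURCE B (Python) =====
-- class InvalidDegree(Exception):
--     """Raised if the string one attempts to interpret is not a valid scale degree"""
--
-- def split_to_base_and_shift(name_or_degree, name_before_accidental):
--     if "b" in name_or_degree and "#" in name_or_degree:
--         raise InvalidDegree("Both sharp and flat in degree")
--     if name_before_accidental:
--         base = name_or_degree.rstrip("b#")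
--         accidentals = name_or_degree[len(base):]
--     else:
--         base = name_or_degree.lstrip("b#")
--         accidentals = name_or_degree[:len(name_or_degree) - len(base)]
--     return base, accidentals.count("#") - accidentals.count("b")
-- ===== Notes on version B (the rewrite author's own statement) =====
-- stated objective: simpler
-- what changed: Replaces A's four character-peeling while loops mutating the string with a single rstrip/lstrip('b#') to get the base, then counts '#' and 'b' in the removed slice.
import Mathlib
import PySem

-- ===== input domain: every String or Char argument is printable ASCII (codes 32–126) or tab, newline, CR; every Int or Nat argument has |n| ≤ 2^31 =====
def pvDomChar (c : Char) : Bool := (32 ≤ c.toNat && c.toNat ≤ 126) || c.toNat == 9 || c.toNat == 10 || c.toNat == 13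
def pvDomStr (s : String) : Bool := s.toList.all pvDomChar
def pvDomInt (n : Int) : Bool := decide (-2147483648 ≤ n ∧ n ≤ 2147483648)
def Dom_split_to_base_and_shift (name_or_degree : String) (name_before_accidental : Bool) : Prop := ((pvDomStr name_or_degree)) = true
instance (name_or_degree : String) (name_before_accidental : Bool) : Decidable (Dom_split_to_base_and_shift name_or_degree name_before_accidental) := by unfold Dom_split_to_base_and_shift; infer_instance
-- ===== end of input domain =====

-- B replaces A's four character-peeling while loops with one rstrip/lstrip('b#') plus counting
-- the removed slice (objective: simpler). Return-value equivalence only; on inputs containing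
-- both 'b' and '#' both Pythons raise InvalidDegree (excluded by Pre_).

-- ===== PORT A =====
-- 'while name_or_degree.endswith(c): shift += d; name_or_degree = name_or_degree[:-1]'
def peelEnd (c : Char) (d : Int) (l : List Char) (s : Int) : List Char × Int :=
  if h : l.getLast? = some c then peelEnd c d l.dropLast (s + d) else (l, s)
termination_by l.length
decreasing_by
  cases l with
  | nil => simp at h
  | cons a t => simp [List.length_dropLast]

-- 'while name_or_degree.startswith(c): shift += d; name_or_degree = name_or_degree[1:]'
def peelStart (c : Char) (d : Int) : List Char → Int → List Char × Int
  | [], s => ([], s)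
  | x :: xs, s => if x = c then peelStart c d xs (s + d) else (x :: xs, s)

def split_to_base_and_shift (name_or_degree : String) (name_before_accidental : Bool) : String × Int :=
  let l := name_or_degree.toList
  if 'b' ∈ l ∧ '#' ∈ l then ("", 0)   -- Python raises InvalidDegree here (outside Pre_)
  else if name_before_accidental then
    let p1 := peelEnd 'b' (-1) l 0
    let p2 := peelEnd '#' 1 p1.1 p1.2
    (String.mk p2.1, p2.2)
  else
    let p1 := peelStart 'b' (-1) l 0
    let p2 := peelStart '#' 1 p1.1 p1.2
    (String.mk p2.1, p2.2)

-- ===== PORT B =====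
def isAcc (c : Char) : Bool := c == 'b' || c == '#'

def split_to_base_and_shift_alt (name_or_degree : String) (name_before_accidental : Bool) : String × Int :=
  let l := name_or_degree.toList
  if 'b' ∈ l ∧ '#' ∈ l then ("", 0)   -- Python raises InvalidDegree here (outside Pre_)
  else if name_before_accidental then
    let base := (l.reverse.dropWhile isAcc).reverse        -- rstrip("b#")
    let acc := l.drop base.length                          -- name_or_degree[len(base):]
    (String.mk base, (acc.count '#' : Int) - (acc.count 'b' : Int))
  else
    let base := l.dropWhile isAcc                          -- lstrip("b#")
    let acc := l.take (l.length - base.length)             -- name_or_degree[:len-len(base)]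
    (String.mk base, (acc.count '#' : Int) - (acc.count 'b' : Int))

-- ===== PRECONDITION & SPEC =====
-- Pre_ excludes exactly the inputs containing both 'b' and '#', on which Python A raises InvalidDegree.
def Pre_split_to_base_and_shift (name_or_degree : String) (name_before_accidental : Bool) : Prop :=
  ¬ ('b' ∈ name_or_degree.toList ∧ '#' ∈ name_or_degree.toList)
instance (name_or_degree : String) (name_before_accidental : Bool) : Decidable (Pre_split_to_base_and_shift name_or_degree name_before_accidental) := by unfold Pre_split_to_base_and_shift; infer_instance

def pvWitness_split_to_base_and_shift : String × Bool := ("A#", true)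

def Spec_split_to_base_and_shift (name_or_degree : String) (name_before_accidental : Bool) (out : String × Int) : Prop := out = split_to_base_and_shift_alt name_or_degree name_before_accidental
instance (name_or_degree : String) (name_before_accidental : Bool) (out : String × Int) : Decidable (Spec_split_to_base_and_shift name_or_degree name_before_accidental out) := by unfold Spec_split_to_base_and_shift; infer_instance

-- ===== CLAIM (what is proved, stated in full; the proofs are below) =====
def Claim_equal_split_to_base_and_shift : Prop := ∀ (name_or_degree : String) (name_before_accidental : Bool), Dom_split_to_base_and_shift name_or_degree name_before_accidental → Pre_split_to_base_and_shift name_or_degree name_before_accidental → Spec_split_to_base_and_shift name_or_degree name_before_accidental (split_to_base_and_shift name_or_degree name_before_accidental)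

-- ===== LEMMAS AND PROOFS =====

theorem peelEnd_reverse (c : Char) (d : Int) (r : List Char) (s : Int) :
    peelEnd c d r.reverse s =
      ((r.dropWhile (· == c)).reverse, s + d * (r.takeWhile (· == c)).length) := by
  induction r generalizing s with
  | nil => rw [peelEnd]; simp
  | cons a t ih =>
    rw [List.reverse_cons, peelEnd]
    by_cases hac : a = c
    · subst hac
      rw [dif_pos (by simp), show (t.reverse ++ [a]).dropLast = t.reverse from by simp, ih]
      have hbc : (a == a) = true := by simp
      rw [List.dropWhile_cons, List.takeWhile_cons, hbc]
      simp only [if_true, List.length_cons, Prod.mk.injEq, true_and]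
      push_cast
      ring
    · have hbc : (a == c) = false := by simp [hac]
      rw [dif_neg (by simp [hac])]
      rw [List.dropWhile_cons, List.takeWhile_cons, hbc]
      simp

theorem peelStart_eq (c : Char) (d : Int) (l : List Char) (s : Int) :
    peelStart c d l s = (l.dropWhile (· == c), s + d * (l.takeWhile (· == c)).length) := by
  induction l generalizing s with
  | nil => simp [peelStart]
  | cons a t ih =>
    by_cases hac : a = c
    · subst hac
      have hbc : (a == a) = true := by simp
      rw [peelStart, if_pos rfl, ih, List.dropWhile_cons, List.takeWhile_cons, hbc]
      simp only [if_true, List.length_cons, Prod.mk.injEq, true_and]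
      push_cast
      ring
    · have hbc : (a == c) = false := by simp [hac]
      rw [peelStart, if_neg hac, List.dropWhile_cons, List.takeWhile_cons, hbc]
      simp

theorem dropWhile_congr' {l : List Char} {p q : Char → Bool}
    (h : ∀ x ∈ l, p x = q x) : l.dropWhile p = l.dropWhile q := by
  induction l with
  | nil => rfl
  | cons a t ih =>
    have ha := h a (by simp)
    simp only [List.dropWhile, ha]
    cases hq : q a
    · simp
    · simpa using ih (fun x hx => h x (by simp [hx]))

theorem takeWhile_congr' {l : List Char} {p q : Char → Bool}
    (h : ∀ x ∈ l, p x = q x) : l.takeWhile p = l.takeWhile q := by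
  induction l with
  | nil => rfl
  | cons a t ih =>
    have ha := h a (by simp)
    simp only [List.takeWhile, ha]
    cases hq : q a
    · simp
    · simpa using ih (fun x hx => h x (by simp [hx]))

theorem dropWhile_eq_self_of_false {l : List Char} {p : Char → Bool}
    (h : ∀ x ∈ l, p x = false) : l.dropWhile p = l := by
  cases l with
  | nil => rfl
  | cons a t => simp [List.dropWhile, h a (by simp)]

theorem takeWhile_eq_nil_of_false {l : List Char} {p : Char → Bool}
    (h : ∀ x ∈ l, p x = false) : l.takeWhile p = [] := by
  cases l with
  | nil => rfl
  | cons a t => simp [List.takeWhile, h a (by simp)]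

-- the core correspondence: one b/#-peel pass on a list with no mixed accidentals
theorem key (r : List Char) (h : ¬ ('b' ∈ r ∧ '#' ∈ r)) :
    (r.dropWhile (· == 'b')).dropWhile (· == '#') = r.dropWhile isAcc ∧
    ((r.takeWhile isAcc).count '#' : Int) - ((r.takeWhile isAcc).count 'b' : Int) =
      0 + (-1) * ((r.takeWhile (· == 'b')).length : Int) +
        1 * (((r.dropWhile (· == 'b')).takeWhile (· == '#')).length : Int) := by
  by_cases hb : 'b' ∈ r
  · have hs : '#' ∉ r := fun hsm => h ⟨hb, hsm⟩
    have hagree : ∀ x ∈ r, isAcc x = (x == 'b') := by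
      intro x hx
      have : x ≠ '#' := fun e => hs (e ▸ hx)
      simp [isAcc, this]
    have hdw : r.dropWhile isAcc = r.dropWhile (· == 'b') :=
      dropWhile_congr' hagree
    have htw : r.takeWhile isAcc = r.takeWhile (· == 'b') :=
      takeWhile_congr' hagree
    have hnos : ∀ x ∈ r.dropWhile (· == 'b'), (x == '#') = false := by
      intro x hx
      have hxr : x ∈ r := (List.dropWhile_sublist _).mem hx
      have : x ≠ '#' := fun e => hs (e ▸ hxr)
      simp [this]
    constructor
    · rw [dropWhile_eq_self_of_false hnos, hdw]
    · rw [htw, takeWhile_eq_nil_of_false hnos]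
      have hall : ∀ x ∈ r.takeWhile (· == 'b'), x = 'b' := by
        intro x hx
        have := List.mem_takeWhile_imp hx
        simpa using this
      have hcb : (r.takeWhile (· == 'b')).count 'b' = (r.takeWhile (· == 'b')).length :=
        List.count_eq_length.mpr (fun b hb' => (hall b hb').symm)
      have hcs : (r.takeWhile (· == 'b')).count '#' = 0 :=
        List.count_eq_zero.mpr (fun hm => by simpa using hall _ hm)
      simp [hcb, hcs]
  · have hagree : ∀ x ∈ r, isAcc x = (x == '#') := by
      intro x hx
      have : x ≠ 'b' := fun e => hb (e ▸ hx)
      simp [isAcc, this]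
    have hnob : ∀ x ∈ r, (x == 'b') = false := by
      intro x hx
      have : x ≠ 'b' := fun e => hb (e ▸ hx)
      simp [this]
    have hdwb : r.dropWhile (· == 'b') = r := dropWhile_eq_self_of_false hnob
    have htwb : r.takeWhile (· == 'b') = [] := takeWhile_eq_nil_of_false hnob
    constructor
    · rw [hdwb, dropWhile_congr' hagree]
    · rw [hdwb, htwb]
      rw [takeWhile_congr' hagree]
      have hall : ∀ x ∈ r.takeWhile (· == '#'), x = '#' := by
        intro x hx
        have := List.mem_takeWhile_imp hx
        simpa using this
      have hcs : (r.takeWhile (· == '#')).count '#' = (r.takeWhile (· == '#')).length :=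
        List.count_eq_length.mpr (fun b hb' => (hall b hb').symm)
      have hcb : (r.takeWhile (· == '#')).count 'b' = 0 :=
        List.count_eq_zero.mpr (fun hm => by simpa using hall _ hm)
      simp [hcb, hcs]

-- ===== VERDICT (by name: the statement is the Claim_ definition above) =====
theorem split_to_base_and_shift_spec : Claim_equal_split_to_base_and_shift := by
  intro n nba _ hpre
  unfold Spec_split_to_base_and_shift split_to_base_and_shift split_to_base_and_shift_alt
  set l := n.toList with hl
  have hguard : ¬ ('b' ∈ l ∧ '#' ∈ l) := hpre
  rw [if_neg hguard, if_neg hguard]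
  cases nba with
  | false =>
    simp only [if_neg (Bool.false_ne_true)]
    have hk := key l hguard
    rw [peelStart_eq, peelStart_eq]
    simp only
    have hL : (l.takeWhile isAcc).length + (l.dropWhile isAcc).length = l.length := by
      rw [← List.length_append, List.takeWhile_append_dropWhile]
    have hlen : l.length - (l.dropWhile isAcc).length = (l.takeWhile isAcc).length := by omega
    have htake : l.take (l.takeWhile isAcc).length = l.takeWhile isAcc := by
      have h := List.take_left' (l₁ := l.takeWhile isAcc) (l₂ := l.dropWhile isAcc)
        (i := (l.takeWhile isAcc).length) rfl
      rwa [List.takeWhile_append_dropWhile] at h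
    rw [hlen, htake, hk.1]
    refine Prod.ext rfl ?_
    rw [← hk.2]
  | true =>
    simp only [reduceIte]
    set r := l.reverse with hr
    have hlr : l = r.reverse := by simp [hr]
    have hguardr : ¬ ('b' ∈ r ∧ '#' ∈ r) := by
      simpa [hr] using hguard
    have hk := key r hguardr
    have h1 : peelEnd 'b' (-1) l 0 =
        ((r.dropWhile (· == 'b')).reverse,
          0 + (-1) * ((r.takeWhile (· == 'b')).length : Int)) := by
      rw [hlr]; exact peelEnd_reverse _ _ _ _
    have h2 : peelEnd '#' 1 ((r.dropWhile (· == 'b')).reverse)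
          (0 + (-1) * ((r.takeWhile (· == 'b')).length : Int)) =
        (((r.dropWhile (· == 'b')).dropWhile (· == '#')).reverse,
          0 + (-1) * ((r.takeWhile (· == 'b')).length : Int)
            + 1 * (((r.dropWhile (· == 'b')).takeWhile (· == '#')).length : Int)) :=
      peelEnd_reverse _ _ _ _
    have hsplit : l = (r.dropWhile isAcc).reverse ++ (r.takeWhile isAcc).reverse := by
      rw [hlr, ← List.reverse_append, List.takeWhile_append_dropWhile]
    have hacc : l.drop ((r.dropWhile isAcc).reverse).length = (r.takeWhile isAcc).reverse := by
      rw [hsplit]; simp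
    simp only [h1, h2, hacc, hk.1]
    refine Prod.ext rfl ?_
    simp only [List.count_reverse]
    rw [← hk.2]
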